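-- pv_equiv track=rewrite | github.com/Kimau/old-blocked | blockPal.py | BitsToBig
-- ===== SOURCE A (Python) =====
-- def BitsToBig(s, num):
-- 	tempBucket = 0
-- 	bigNums = []
--
-- 	for i in range(len(s)):
-- 		if s[i] >= num:
-- 			bigNums.append(tempBucket)
-- 			tempBucket = 0
-- 		else:
-- 			tempBucket = (tempBucket * num) + s[i]
--
-- 	if tempBucket > 0:
-- 		bigNums.append(tempBucket)
-- 	elif len(bigNums) == 0:
-- 		bigNums = [0]
--
-- 	return bigNums
-- ===== SOURCE B (Python) =====
-- def BitsToBig(s, num):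
--     def horner(seg):
--         acc = 0
--         for x in seg:
--             acc = acc * num + x
--         return acc
--     segs = []
--     cur = []
--     for x in s:
--         if x >= num:
--             segs.append(cur)
--             cur = []
--         else:
--             cur.append(x)
--     out = [horner(seg) for seg in segs]
--     last = horner(cur)
--     if last > 0:
--         out.append(last)
--     return out if out else [0]
-- ===== Notes on version B (the rewrite author's own statement) =====
-- stated objective: alternative
-- what changed: B splits the input into delimiter-separated segments first and then maps a Horner fold over each segment, instead of A's single loop that interleaves accumulation and flushing in one running bucket.
import Mathlib
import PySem

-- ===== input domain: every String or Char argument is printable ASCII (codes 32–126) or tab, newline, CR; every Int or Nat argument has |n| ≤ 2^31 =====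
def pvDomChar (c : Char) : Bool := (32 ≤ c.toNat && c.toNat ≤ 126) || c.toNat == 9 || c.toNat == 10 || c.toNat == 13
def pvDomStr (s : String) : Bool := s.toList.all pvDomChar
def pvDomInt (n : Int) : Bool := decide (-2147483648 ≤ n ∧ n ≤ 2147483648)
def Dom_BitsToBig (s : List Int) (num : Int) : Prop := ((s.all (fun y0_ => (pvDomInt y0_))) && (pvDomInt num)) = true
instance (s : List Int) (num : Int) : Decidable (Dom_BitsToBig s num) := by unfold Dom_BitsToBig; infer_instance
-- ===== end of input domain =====

-- B re-decomposes BitsToBig: it first splits the input into delimiter-separated segments and then maps a Horner fold over them, instead of A's single interleaved bucket loop (objective: alternative, same cost).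


-- ===== PORT A =====
def BitsToBig (s : List Int) (num : Int) : List Int :=
  let st := s.foldl (fun (st : Int × List Int) x =>
    if x ≥ num then (0, st.2 ++ [st.1]) else (st.1 * num + x, st.2)) (0, [])
  if st.1 > 0 then st.2 ++ [st.1]
  else if st.2.length = 0 then [0]
  else st.2

-- ===== PORT B =====
def pvHorner (num : Int) (seg : List Int) : Int :=
  seg.foldl (fun acc x => acc * num + x) 0

def BitsToBig_alt (s : List Int) (num : Int) : List Int :=
  let st := s.foldl (fun (st : List (List Int) × List Int) x =>
    if x ≥ num then (st.1 ++ [st.2], []) else (st.1, st.2 ++ [x])) ([], [])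
  let out := st.1.map (pvHorner num)
  let last := pvHorner num st.2
  let out2 := if last > 0 then out ++ [last] else out
  if out2 = [] then [0] else out2

-- ===== PRECONDITION & SPEC =====
def Spec_BitsToBig (s : List Int) (num : Int) (out : List Int) : Prop := out = BitsToBig_alt s num
instance (s : List Int) (num : Int) (out : List Int) : Decidable (Spec_BitsToBig s num out) := by unfold Spec_BitsToBig; infer_instance

-- ===== CLAIM (what is proved, stated in full; the proofs are below) =====
def Claim_equal_BitsToBig : Prop := ∀ (s : List Int) (num : Int), Dom_BitsToBig s num → Spec_BitsToBig s num (BitsToBig s num)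

-- ===== LEMMAS AND PROOFS =====

-- ===== VERDICT (by name: the statement is the Claim_ definition above) =====
theorem pvHorner_snoc (num : Int) (seg : List Int) (x : Int) :
    pvHorner num (seg ++ [x]) = pvHorner num seg * num + x := by
  simp [pvHorner, List.foldl_append]

theorem pvLoop_inv (s : List Int) (num : Int) (segs : List (List Int)) (cur : List Int) :
    s.foldl (fun (st : Int × List Int) x =>
      if x ≥ num then (0, st.2 ++ [st.1]) else (st.1 * num + x, st.2))
      (pvHorner num cur, segs.map (pvHorner num))
    = ((s.foldl (fun (st : List (List Int) × List Int) x =>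
        if x ≥ num then (st.1 ++ [st.2], []) else (st.1, st.2 ++ [x])) (segs, cur)).2 |> pvHorner num,
       ((s.foldl (fun (st : List (List Int) × List Int) x =>
        if x ≥ num then (st.1 ++ [st.2], []) else (st.1, st.2 ++ [x])) (segs, cur)).1).map (pvHorner num)) := by
  induction s generalizing segs cur with
  | nil => simp
  | cons x rest ih =>
    simp only [List.foldl_cons]
    by_cases h : x ≥ num
    · simp only [h, if_pos]
      have h2 := ih (segs ++ [cur]) []
      have h0 : pvHorner num ([] : List Int) = 0 := rfl
      rw [h0] at h2
      simp only [List.map_append, List.map_cons, List.map_nil] at h2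
      exact h2
    · simp only [h, if_neg, not_false_iff]
      rw [← pvHorner_snoc]
      exact ih segs (cur ++ [x])

theorem BitsToBig_spec : Claim_equal_BitsToBig := by
  intro s num _
  unfold Spec_BitsToBig BitsToBig BitsToBig_alt
  have h := pvLoop_inv s num [] []
  have h0 : pvHorner num ([] : List Int) = 0 := by simp [pvHorner]
  rw [h0] at h
  simp only [List.map_nil] at h
  rw [h]
  set st := s.foldl (fun (st : List (List Int) × List Int) x =>
    if x ≥ num then (st.1 ++ [st.2], []) else (st.1, st.2 ++ [x])) ([], [])
  by_cases hl : pvHorner num st.2 > 0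
  · simp [hl]
  · simp [hl, List.length_eq_zero_iff]
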